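-- pv_equiv track=rewrite | github.com/203o/Golfer | routers/golf.py | ensure_unique_numbers
-- ===== SOURCE A (Python) =====
-- def ensure_unique_numbers(base_numbers: list[int], min_num: int = 1, max_num: int = 50) -> list[int]:
--     used: set[int] = set()
--     out: list[int] = []
--     span = (max_num - min_num) + 1
--     for raw in base_numbers:
--         candidate = raw
--         while candidate in used:
--             candidate = min_num + ((candidate - min_num + 1) % span)
--         used.add(candidate)
--         out.append(candidate)
--     return out
-- ===== SOURCE B (Python) =====
-- def ensure_unique_numbers(base_numbers: list[int], min_num: int = 1, max_num: int = 50) -> list[int]: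
--     span = (max_num - min_num) + 1
--     parent: dict[int, int | None] = {}   # occupied in-range slot -> cached skip pointer (None = not computed yet)
--     taken_out: set[int] = set()          # occupied values outside [min_num, max_num]
--     out: list[int] = []
--
--     def find(x: int) -> int:
--         # union-find style walk: follow skip pointers to the first free slot, then compress the path
--         path = []
--         while x in parent:
--             path.append(x)
--             nxt = parent[x]
--             if nxt is None:
--                 nxt = min_num + ((x - min_num + 1) % span)
--             x = nxt
--         for p in path:
--             parent[p] = x
--         return x
--
--     for raw in base_numbers:
--         if raw in parent or raw in taken_out:
--             c = find(min_num + ((raw - min_num + 1) % span))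
--         else:
--             c = raw
--         if min_num <= c <= max_num:
--             parent[c] = None
--         else:
--             taken_out.add(c)
--         out.append(c)
--     return out
-- ===== Notes on version B (the rewrite author's own statement) =====
-- stated objective: alternative
-- what changed: A resolves each duplicate by stepping the candidate one slot at a time through the circular range until a free value is found (re-scanning long occupied runs on every collision); B keeps a union-find style dict of path-compressed next-free-slot pointers plus a set for taken out-of-range values, so each collision jumps over the whole occupied run in amortised near-constant time.
-- outside the precondition, e.g. on ensure_unique_numbers([0, 0, 0], 3, 0): A returns [0, 3, 2], B returns [0, 3, 3]
import Mathlib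
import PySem

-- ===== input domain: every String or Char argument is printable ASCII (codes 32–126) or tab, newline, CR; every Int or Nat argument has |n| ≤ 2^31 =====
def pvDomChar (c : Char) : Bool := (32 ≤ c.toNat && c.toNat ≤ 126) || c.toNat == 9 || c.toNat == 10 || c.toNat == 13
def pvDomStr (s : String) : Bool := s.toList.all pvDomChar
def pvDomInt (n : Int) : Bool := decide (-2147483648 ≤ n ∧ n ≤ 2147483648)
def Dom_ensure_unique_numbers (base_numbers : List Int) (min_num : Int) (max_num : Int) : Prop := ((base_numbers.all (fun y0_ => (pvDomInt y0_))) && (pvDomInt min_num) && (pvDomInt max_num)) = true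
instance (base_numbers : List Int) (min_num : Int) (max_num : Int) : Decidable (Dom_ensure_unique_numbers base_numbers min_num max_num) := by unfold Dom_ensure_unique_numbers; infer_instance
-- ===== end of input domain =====

-- B replaces A's step-by-step linear probing with a union-find style dict of path-compressed
-- "next free slot" pointers (objective: alternative algorithm — collisions jump over occupied runs
-- instead of rescanning them slot by slot).

-- ===== PORT A =====
-- the probe step both Pythons spell as  min_num + ((c - min_num + 1) % span)
def pvNext (min_num span c : Int) : Int := min_num + PySem.Int.mod (c - min_num + 1) span

-- A's 'while candidate in used' loop; fuel span+1 is enough on Pre_ (a free slot is met within span probes)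
def pvProbe (min_num span : Int) : Nat → PySem.Set Int → Int → Int
  | 0, _, c => c
  | fuel+1, used, c =>
    if PySem.Set.contains used c then pvProbe min_num span fuel used (pvNext min_num span c) else c

def pvStepA (min_num span : Int) (st : PySem.Set Int × List Int) (raw : Int) : PySem.Set Int × List Int :=
  let c := pvProbe min_num span (span.toNat + 1) st.1 raw
  (PySem.Set.add st.1 c, st.2 ++ [c])

def ensure_unique_numbers (base_numbers : List Int) (min_num : Int) (max_num : Int) : List Int :=
  let span := (max_num - min_num) + 1
  (base_numbers.foldl (pvStepA min_num span) ((PySem.Set.empty : PySem.Set Int), [])).2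

-- ===== PORT B =====
-- B's 'find': follow skip pointers (None = pointer not cached yet) collecting the path;
-- fuel span+2 is enough on Pre_ (each hop strictly advances along the probe sequence)
def pvFind (min_num span : Int) : Nat → PySem.Dict Int (Option Int) → Int → List Int → Int × List Int
  | 0, _, x, path => (x, path)
  | fuel+1, parent, x, path =>
    match parent.get? x with
    | none => (x, path)
    | some v => pvFind min_num span fuel parent (v.getD (pvNext min_num span x)) (path ++ [x])

-- B's path compression: point every visited slot at the root found
def pvCompress (parent : PySem.Dict Int (Option Int)) (path : List Int) (root : Int) :
    PySem.Dict Int (Option Int) :=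
  path.foldl (fun d p => d.insert p (some root)) parent

def pvStepB (min_num max_num span : Int)
    (st : PySem.Dict Int (Option Int) × PySem.Set Int × List Int) (raw : Int) :
    PySem.Dict Int (Option Int) × PySem.Set Int × List Int :=
  let parent := st.1
  let tout := st.2.1
  let out := st.2.2
  let cp : Int × PySem.Dict Int (Option Int) :=
    if parent.contains raw || PySem.Set.contains tout raw then
      let fr := pvFind min_num span (span.toNat + 2) parent (pvNext min_num span raw) []
      (fr.1, pvCompress parent fr.2 fr.1)
    else (raw, parent)
  let c := cp.1
  if min_num ≤ c ∧ c ≤ max_num then (cp.2.insert c none, tout, out ++ [c])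
  else (cp.2, PySem.Set.add tout c, out ++ [c])

def ensure_unique_numbers_alt (base_numbers : List Int) (min_num : Int) (max_num : Int) : List Int :=
  let span := (max_num - min_num) + 1
  (base_numbers.foldl (pvStepB min_num max_num span)
    ((PySem.Dict.empty : PySem.Dict Int (Option Int)), (PySem.Set.empty : PySem.Set Int), [])).2.2

-- ===== PRECONDITION & SPEC =====
-- counts the elements that will occupy a slot of [min_num, max_num]: those inside the range,
-- and repeats of an earlier element (a duplicate is diverted into the range); a pure shape count of the input
def pvNeedy (min_num max_num : Int) : List Int → List Int → Nat
  | _, [] => 0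
  | seen, x :: rest =>
      (if (min_num ≤ x ∧ x ≤ max_num) ∨ x ∈ seen then 1 else 0) +
        pvNeedy min_num max_num (x :: seen) rest

-- Pre_ excludes inputs where A's probing diverges or hits '% 0' (more slot-demanding elements
-- than the range holds), and the max_num < min_num corner with duplicates, where A's walk through
-- Python's negative-divisor modulo is an accident of the implementation.
def Pre_ensure_unique_numbers (base_numbers : List Int) (min_num : Int) (max_num : Int) : Prop :=
  base_numbers.Nodup ∨
    (min_num ≤ max_num ∧
      (pvNeedy min_num max_num [] base_numbers : Int) ≤ (max_num - min_num) + 1)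
instance (base_numbers : List Int) (min_num : Int) (max_num : Int) : Decidable (Pre_ensure_unique_numbers base_numbers min_num max_num) := by unfold Pre_ensure_unique_numbers; infer_instance

def pvWitness_ensure_unique_numbers : List Int × Int × Int := ([1, 1, 2], 1, 3)

def Spec_ensure_unique_numbers (base_numbers : List Int) (min_num : Int) (max_num : Int) (out : List Int) : Prop := out = ensure_unique_numbers_alt base_numbers min_num max_num
instance (base_numbers : List Int) (min_num : Int) (max_num : Int) (out : List Int) : Decidable (Spec_ensure_unique_numbers base_numbers min_num max_num out) := by unfold Spec_ensure_unique_numbers; infer_instance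

-- ===== CLAIM (what is proved, stated in full; the proofs are below) =====
def Claim_equal_ensure_unique_numbers : Prop := ∀ (base_numbers : List Int) (min_num : Int) (max_num : Int), Dom_ensure_unique_numbers base_numbers min_num max_num → Pre_ensure_unique_numbers base_numbers min_num max_num → Spec_ensure_unique_numbers base_numbers min_num max_num (ensure_unique_numbers base_numbers min_num max_num)

-- ===== LEMMAS AND PROOFS =====

-- the probe sequence: k applications of pvNext
def pvSeq (min_num span c : Int) : Nat → Int
  | 0 => c
  | k+1 => pvSeq min_num span (pvNext min_num span c) k

theorem pvSeq_succ (min_num span c : Int) (k : Nat) :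
    pvSeq min_num span c (k+1) = pvSeq min_num span (pvNext min_num span c) k := rfl

theorem pvSeq_add (min_num span c : Int) (a b : Nat) :
    pvSeq min_num span c (a + b) = pvSeq min_num span (pvSeq min_num span c a) b := by
  induction a generalizing c with
  | zero => simp [pvSeq]
  | succ a ih =>
      have h : a + 1 + b = (a + b) + 1 := by omega
      rw [h, pvSeq_succ, ih, pvSeq_succ]

theorem pvNext_range (min_num span c : Int) (h : 0 < span) :
    min_num ≤ pvNext min_num span c ∧ pvNext min_num span c ≤ min_num + span - 1 := by
  have h1 := PySem.Int.mod_nonneg (c - min_num + 1) h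
  have h2 := PySem.Int.mod_lt (c - min_num + 1) h
  unfold pvNext; omega

theorem pvSeq_range (min_num span x : Int) (h : 0 < span)
    (hx : min_num ≤ x ∧ x ≤ min_num + span - 1) (k : Nat) :
    min_num ≤ pvSeq min_num span x k ∧ pvSeq min_num span x k ≤ min_num + span - 1 := by
  induction k generalizing x with
  | zero => exact hx
  | succ k ih => rw [pvSeq_succ]; exact ih _ (pvNext_range min_num span x h)

theorem pvSeq_closed (min_num span x : Int) (h : 0 < span)
    (hx : min_num ≤ x ∧ x ≤ min_num + span - 1) (k : Nat) :
    pvSeq min_num span x k = min_num + (x - min_num + k) % span := by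
  induction k generalizing x with
  | zero =>
      show x = min_num + (x - min_num + ((0 : Nat) : Int)) % span
      have h0 : x - min_num + ((0 : Nat) : Int) = x - min_num := by push_cast; ring
      rw [h0, Int.emod_eq_of_lt (by omega) (by omega)]
      omega
  | succ k ih =>
      rw [pvSeq_succ, ih _ (pvNext_range min_num span x h)]
      unfold pvNext
      rw [PySem.Int.mod_eq_emod_of_pos h]
      have h2 : min_num + (x - min_num + 1) % span - min_num + (k : Int)
          = (x - min_num + 1) % span + k := by ring
      rw [h2, Int.emod_add_emod]
      congr 1
      push_cast
      ring

-- reaching any slot of the range within span probes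
theorem pvSeq_surj (min_num span x t : Int) (h : 0 < span)
    (hx : min_num ≤ x ∧ x ≤ min_num + span - 1) (ht : 0 ≤ t ∧ t < span) :
    ∃ k : Nat, (k : Int) < span ∧ pvSeq min_num span x k = min_num + t := by
  have hd0 : 0 ≤ (t - (x - min_num)) % span := Int.emod_nonneg _ (by omega)
  have hd1 : (t - (x - min_num)) % span < span := Int.emod_lt_of_pos _ h
  refine ⟨((t - (x - min_num)) % span).toNat, by omega, ?_⟩
  rw [pvSeq_closed min_num span x h hx]
  rw [Int.toNat_of_nonneg hd0]
  congr 1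
  rw [Int.add_emod, Int.emod_emod_of_dvd _ (dvd_refl span), ← Int.add_emod]
  have he : x - min_num + (t - (x - min_num)) = t := by ring
  rw [he, Int.emod_eq_of_lt (by omega) (by omega)]

-- A's while-loop returns the first free slot of the probe sequence
theorem pvProbe_spec (min_num span : Int) (u : PySem.Set Int) (c : Int) (j fuel : Nat)
    (hf : j < fuel) (hocc : ∀ i < j, pvSeq min_num span c i ∈ u)
    (hfree : pvSeq min_num span c j ∉ u) :
    pvProbe min_num span fuel u c = pvSeq min_num span c j := by
  induction j generalizing c fuel with
  | zero =>
      match fuel, hf with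
      | fuel+1, _ =>
        simp only [pvProbe]
        rw [if_neg]
        · rfl
        · simpa [PySem.Set.contains_iff] using hfree
  | succ j ih =>
      match fuel, hf with
      | fuel+1, hf =>
        simp only [pvProbe]
        rw [if_pos (by simpa [PySem.Set.contains_iff] using hocc 0 (by omega))]
        rw [pvSeq_succ] at hfree ⊢
        exact ih _ _ (by omega) (fun i hi => by
          have := hocc (i+1) (by omega)
          rwa [pvSeq_succ] at this) hfree

-- the coupling invariant between A's used-set and B's (parent, taken_out) state
def pvInv (min_num max_num span : Int) (parent : PySem.Dict Int (Option Int))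
    (tout : PySem.Set Int) (u : PySem.Set Int) : Prop :=
  (∀ x : Int, x ∈ u ↔ (parent.contains x = true ∨ x ∈ tout)) ∧
  (∀ x ∈ tout, ¬(min_num ≤ x ∧ x ≤ max_num)) ∧
  (∀ k : Int, parent.contains k = true → min_num ≤ k ∧ k ≤ max_num) ∧
  (∀ k p : Int, parent.get? k = some (some p) →
    ∃ jp : Nat, pvSeq min_num span (pvNext min_num span k) jp = p ∧
      ∀ i < jp, pvSeq min_num span (pvNext min_num span k) i ∈ u)

theorem pvInv_empty (min_num max_num span : Int) :
    pvInv min_num max_num span PySem.Dict.empty PySem.Set.empty PySem.Set.empty := by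
  refine ⟨?_, ?_, ?_, ?_⟩ <;> simp [PySem.Set.empty, PySem.Dict.contains_empty, PySem.Dict.get?_empty]

theorem pvCompress_get? (parent : PySem.Dict Int (Option Int)) (path : List Int) (r k : Int) :
    (pvCompress parent path r).get? k =
      if k ∈ path then some (some r) else parent.get? k := by
  induction path generalizing parent with
  | nil => simp [pvCompress]
  | cons p ps ih =>
      show (pvCompress (parent.insert p (some r)) ps r).get? k = _
      rw [ih]
      by_cases hk : k ∈ ps
      · simp [hk, List.mem_cons, hk]
      · by_cases hkp : k = p
        · subst hkp; simp [hk, PySem.Dict.get?_insert_self]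
        · simp [hk, hkp, PySem.Dict.get?_insert_of_ne _ _ hkp]

theorem pvCompress_contains (parent : PySem.Dict Int (Option Int)) (path : List Int) (r k : Int)
    (hpath : ∀ p ∈ path, parent.contains p = true) :
    (pvCompress parent path r).contains k = parent.contains k := by
  rw [PySem.Dict.contains_eq_isSome_get?, PySem.Dict.contains_eq_isSome_get?, pvCompress_get?]
  by_cases hk : k ∈ path
  · simp only [hk, if_pos]
    have := hpath k hk
    rw [PySem.Dict.contains_eq_isSome_get?] at this
    simp [this.symm]
  · simp [hk]

-- B's find walks the probe sequence to its first free slot, and the path it collects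
-- consists of occupied slots whose pointers may soundly be redirected to that slot
theorem pvFind_walk (min_num max_num span : Int) (h : 0 < span)
    (hspan : span = max_num - min_num + 1)
    (parent : PySem.Dict Int (Option Int)) (tout u : PySem.Set Int)
    (hInv : pvInv min_num max_num span parent tout u)
    (x0 : Int) (hx0 : min_num ≤ x0 ∧ x0 ≤ min_num + span - 1) (J : Nat)
    (hfree : pvSeq min_num span x0 J ∉ u) (hocc : ∀ i < J, pvSeq min_num span x0 i ∈ u) :
    ∀ fuel j x path, J - j < fuel → j ≤ J → pvSeq min_num span x0 j = x →
      (pvFind min_num span fuel parent x path).1 = pvSeq min_num span x0 J ∧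
      (∀ p ∈ (pvFind min_num span fuel parent x path).2, p ∈ path ∨
        (parent.contains p = true ∧
          ∃ jp : Nat, pvSeq min_num span (pvNext min_num span p) jp = pvSeq min_num span x0 J ∧
            ∀ i < jp, pvSeq min_num span (pvNext min_num span p) i ∈ u)) := by
  intro fuel
  induction fuel with
  | zero => intro j x path hfuel; omega
  | succ fuel ih =>
      intro j x path _ hj hx
      simp only [pvFind]
      cases hget : parent.get? x with
      | none =>
          have hxrange := pvSeq_range min_num span x0 h hx0 j
          rw [hx] at hxrange
          have hxnotu : x ∉ u := by
            intro hxu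
            rcases (hInv.1 x).mp hxu with hc | ht
            · rw [PySem.Dict.contains_eq_isSome_get?, hget] at hc
              simp at hc
            · exact hInv.2.1 x ht ⟨by omega, by omega⟩
          have hjJ : j = J := by
            by_contra hne
            exact hxnotu (hx ▸ hocc j (by omega))
          subst hjJ
          exact ⟨hx.symm, fun p hp => Or.inl hp⟩
      | some v =>
          have hkey : parent.contains x = true := by
            rw [PySem.Dict.contains_eq_isSome_get?, hget]; rfl
          have hxu : x ∈ u := (hInv.1 x).mpr (Or.inl hkey)
          have hjlt : j < J := by
            rcases Nat.lt_or_ge j J with h' | h'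
            · exact h'
            · exact absurd (by rw [← (by omega : j = J), hx]; exact hxu) hfree
          have hnxt : ∃ jp : Nat,
              pvSeq min_num span (pvNext min_num span x) jp = v.getD (pvNext min_num span x) ∧
              ∀ i < jp, pvSeq min_num span (pvNext min_num span x) i ∈ u := by
            cases v with
            | none => exact ⟨0, rfl, fun i hi => absurd hi (Nat.not_lt_zero i)⟩
            | some p => simpa using hInv.2.2.2 x p hget
          obtain ⟨jp, hjp, hjpi⟩ := hnxt
          have hstep1 : pvSeq min_num span x0 (j + 1) = pvNext min_num span x := by
            rw [(by omega : j + 1 = j + 1), pvSeq_add min_num span x0 j 1, hx]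
            rfl
          have hseqj' : pvSeq min_num span x0 (j + 1 + jp) = v.getD (pvNext min_num span x) := by
            rw [pvSeq_add min_num span x0 (j + 1) jp, hstep1, hjp]
          have hoccj' : ∀ i < j + 1 + jp, pvSeq min_num span x0 i ∈ u := by
            intro i hi
            by_cases hij : i ≤ j
            · exact hocc i (by omega)
            · have heq : pvSeq min_num span x0 i
                  = pvSeq min_num span (pvNext min_num span x) (i - (j + 1)) := by
                calc pvSeq min_num span x0 i
                    = pvSeq min_num span x0 ((j + 1) + (i - (j + 1))) := by
                      congr 1
                      omega
                  _ = pvSeq min_num span (pvSeq min_num span x0 (j + 1)) (i - (j + 1)) :=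
                      pvSeq_add min_num span x0 (j + 1) (i - (j + 1))
                  _ = _ := by rw [hstep1]
              rw [heq]
              exact hjpi _ (by omega)
          have hj'J : j + 1 + jp ≤ J := by
            by_contra hcon
            exact hfree (hoccj' J (by omega))
          obtain ⟨hres1, hres2⟩ := ih (j + 1 + jp) (v.getD (pvNext min_num span x))
            (path ++ [x]) (by omega) hj'J hseqj'
          refine ⟨hres1, ?_⟩
          intro p hp
          rcases hres2 p hp with hp' | hcond
          · rcases List.mem_append.mp hp' with hp'' | hp''
            · exact Or.inl hp''
            · have hpx : p = x := by simpa using hp''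
              subst hpx
              refine Or.inr ⟨hkey, J - (j + 1), ?_, ?_⟩
              · rw [← hstep1, ← pvSeq_add]
                congr 1
                omega
              · intro i hi
                have heq : pvSeq min_num span (pvNext min_num span p) i
                    = pvSeq min_num span x0 (j + 1 + i) := by
                  rw [pvSeq_add, hstep1]
                rw [heq]
                exact hocc _ (by omega)
          · exact Or.inr hcond

theorem pvInv_compress (min_num max_num span : Int)
    (parent : PySem.Dict Int (Option Int)) (tout u : PySem.Set Int)
    (hInv : pvInv min_num max_num span parent tout u) (r : Int) (path : List Int)
    (hpath : ∀ p ∈ path, parent.contains p = true ∧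
      ∃ jp : Nat, pvSeq min_num span (pvNext min_num span p) jp = r ∧
        ∀ i < jp, pvSeq min_num span (pvNext min_num span p) i ∈ u) :
    pvInv min_num max_num span (pvCompress parent path r) tout u := by
  obtain ⟨h1, h2, h3, h4⟩ := hInv
  have hcont : ∀ k, (pvCompress parent path r).contains k = parent.contains k :=
    fun k => pvCompress_contains parent path r k (fun p hp => (hpath p hp).1)
  refine ⟨fun x => by rw [hcont]; exact h1 x, h2, fun k hk => h3 k (by rwa [hcont] at hk), ?_⟩
  intro k p hget
  rw [pvCompress_get?] at hget
  by_cases hk : k ∈ path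
  · rw [if_pos hk] at hget
    obtain ⟨_, jp, hjp, hi⟩ := hpath k hk
    exact ⟨jp, by rw [hjp]; injection hget with h'; injection h', hi⟩
  · rw [if_neg hk] at hget
    exact h4 k p hget

theorem pvInv_occupy_in (min_num max_num span : Int)
    (parent : PySem.Dict Int (Option Int)) (tout u : PySem.Set Int)
    (hInv : pvInv min_num max_num span parent tout u) (c : Int)
    (hc : min_num ≤ c ∧ c ≤ max_num) :
    pvInv min_num max_num span (parent.insert c none) tout (PySem.Set.add u c) := by
  obtain ⟨h1, h2, h3, h4⟩ := hInv
  refine ⟨?_, h2, ?_, ?_⟩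
  · intro x
    simp only [PySem.Set.mem_add, PySem.Dict.contains_insert, h1 x, Bool.or_eq_true, beq_iff_eq]
    tauto
  · intro k hk
    rw [PySem.Dict.contains_insert] at hk
    rcases Bool.or_eq_true_iff.mp hk with h | h
    · have : k = c := beq_iff_eq.mp h
      subst this; exact hc
    · exact h3 k h
  · intro k p hget
    by_cases hkc : k = c
    · subst hkc; rw [PySem.Dict.get?_insert_self] at hget; injection hget with h'; cases h'
    · rw [PySem.Dict.get?_insert_of_ne _ _ hkc] at hget
      obtain ⟨jp, hjp, hi⟩ := h4 k p hget
      exact ⟨jp, hjp, fun i hi' => by rw [PySem.Set.mem_add]; exact Or.inl (hi i hi')⟩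

theorem pvInv_occupy_out (min_num max_num span : Int)
    (parent : PySem.Dict Int (Option Int)) (tout u : PySem.Set Int)
    (hInv : pvInv min_num max_num span parent tout u) (c : Int)
    (hc : ¬(min_num ≤ c ∧ c ≤ max_num)) :
    pvInv min_num max_num span parent (PySem.Set.add tout c) (PySem.Set.add u c) := by
  obtain ⟨h1, h2, h3, h4⟩ := hInv
  refine ⟨?_, ?_, h3, ?_⟩
  · intro x
    rw [PySem.Set.mem_add, PySem.Set.mem_add, h1 x]
    tauto
  · intro x hx
    rw [PySem.Set.mem_add] at hx
    rcases hx with h | h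
    · exact h2 x h
    · subst h; exact hc
  · intro k p hget
    obtain ⟨jp, hjp, hi⟩ := h4 k p hget
    exact ⟨jp, hjp, fun i hi' => by rw [PySem.Set.mem_add]; exact Or.inl (hi i hi')⟩

theorem pv_exists_free (min_num max_num span : Int) (hspan : span = max_num - min_num + 1)
    (h : 0 < span) (u : PySem.Set Int) (hu : u.Nodup)
    (hlen : (u.filter (fun x => decide (min_num ≤ x ∧ x ≤ max_num))).length < span.toNat) :
    ∃ x : Int, min_num ≤ x ∧ x ≤ max_num ∧ x ∉ u := by
  classical
  by_contra hcon
  push_neg at hcon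
  have hall : ∀ t : Nat, t < span.toNat → (min_num + (t : Int)) ∈ u := by
    intro t ht
    exact hcon _ (by omega) (by omega)
  have hinj : Function.Injective (fun t : Nat => min_num + (t : Int)) := by
    intro a b hab
    simp only at hab
    omega
  have hsub : (Finset.range span.toNat).image (fun t : Nat => min_num + (t : Int)) ⊆
      (u.filter (fun x => decide (min_num ≤ x ∧ x ≤ max_num))).toFinset := by
    intro a ha
    simp only [Finset.mem_image, Finset.mem_range] at ha
    obtain ⟨t, ht, rfl⟩ := ha
    simp only [List.mem_toFinset, List.mem_filter, decide_eq_true_eq]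
    exact ⟨hall t ht, by omega, by omega⟩
  have h1 : ((Finset.range span.toNat).image (fun t : Nat => min_num + (t : Int))).card
      = span.toNat := by
    rw [Finset.card_image_of_injective _ hinj, Finset.card_range]
  have h2 := Finset.card_le_card hsub
  have h3 := (u.filter (fun x => decide (min_num ≤ x ∧ x ≤ max_num))).toFinset_card_le
  omega

-- one loop iteration: A's chosen value, B's chosen value and both new states agree
theorem pvStep_eq (min_num max_num span : Int) (hspan : span = max_num - min_num + 1)
    (u : PySem.Set Int) (hu : u.Nodup) (parent : PySem.Dict Int (Option Int))
    (tout : PySem.Set Int) (hInv : pvInv min_num max_num span parent tout u)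
    (raw : Int) (outA outB : List Int)
    (hok : raw ∉ u ∨ (0 < span ∧ ∃ x : Int, min_num ≤ x ∧ x ≤ max_num ∧ x ∉ u)) :
    ∃ c : Int, c ∉ u ∧ (raw ∉ u → c = raw) ∧ (raw ∈ u → min_num ≤ c ∧ c ≤ max_num) ∧
      pvStepA min_num span (u, outA) raw = (PySem.Set.add u c, outA ++ [c]) ∧
      (pvStepB min_num max_num span (parent, tout, outB) raw).2.2 = outB ++ [c] ∧
      pvInv min_num max_num span (pvStepB min_num max_num span (parent, tout, outB) raw).1
        (pvStepB min_num max_num span (parent, tout, outB) raw).2.1 (PySem.Set.add u c) := by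
  by_cases hraw : raw ∈ u
  · -- collision: A probes, B walks the pointer structure
    have hok' : 0 < span ∧ ∃ x : Int, min_num ≤ x ∧ x ≤ max_num ∧ x ∉ u := by
      rcases hok with h | h
      · exact absurd hraw h
      · exact h
    obtain ⟨hpos, f, hf1, hf2, hfu⟩ := hok'
    have hx0 : min_num ≤ pvNext min_num span raw ∧
        pvNext min_num span raw ≤ min_num + span - 1 := pvNext_range min_num span raw hpos
    have hex : ∃ k : Nat, pvSeq min_num span (pvNext min_num span raw) k ∉ u := by
      obtain ⟨k, hk, hkeq⟩ := pvSeq_surj min_num span (pvNext min_num span raw) (f - min_num)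
        hpos hx0 ⟨by omega, by omega⟩
      refine ⟨k, ?_⟩
      rw [hkeq, (by ring : min_num + (f - min_num) = f)]
      exact hfu
    classical
    set x0 := pvNext min_num span raw with hx0def
    set J := Nat.find hex with hJdef
    have hfree : pvSeq min_num span x0 J ∉ u := Nat.find_spec hex
    have hocc : ∀ i < J, pvSeq min_num span x0 i ∈ u := by
      intro i hi
      have := Nat.find_min hex hi
      simpa using this
    have hJlt : J < span.toNat := by
      obtain ⟨k, hk, hkeq⟩ := pvSeq_surj min_num span x0 (f - min_num) hpos hx0
        ⟨by omega, by omega⟩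
      have : J ≤ k := Nat.find_min' hex (by
        rw [hkeq, (by ring : min_num + (f - min_num) = f)]
        exact hfu)
      omega
    set c := pvSeq min_num span x0 J with hcdef
    have hcrange : min_num ≤ c ∧ c ≤ max_num := by
      have := pvSeq_range min_num span x0 hpos hx0 J
      constructor
      · omega
      · omega
    have hA : pvProbe min_num span (span.toNat + 1) u raw = c := by
      show pvProbe min_num span (span.toNat + 1) u raw = _
      simp only [pvProbe]
      rw [if_pos (by simpa [PySem.Set.contains_iff] using hraw)]
      exact pvProbe_spec min_num span u x0 J span.toNat (by omega) hocc hfree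
    have hrawB : (parent.contains raw || PySem.Set.contains tout raw) = true := by
      rcases (hInv.1 raw).mp hraw with h' | h'
      · simp [h']
      · simp [PySem.Set.contains_iff, h']
    obtain ⟨hw1, hw2⟩ := pvFind_walk min_num max_num span hpos hspan parent tout u hInv
      x0 hx0 J hfree hocc (span.toNat + 2) 0 x0 [] (by omega) (by omega) rfl
    have hpath : ∀ p ∈ (pvFind min_num span (span.toNat + 2) parent x0 []).2,
        parent.contains p = true ∧
        ∃ jp : Nat, pvSeq min_num span (pvNext min_num span p) jp = c ∧
          ∀ i < jp, pvSeq min_num span (pvNext min_num span p) i ∈ u := by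
      intro p hp
      rcases hw2 p hp with hp' | hp'
      · simp at hp'
      · exact hp'
    refine ⟨c, hfree, fun h' => absurd hraw h', fun _ => hcrange, ?_, ?_, ?_⟩
    · unfold pvStepA
      rw [hA]
    · simp only [pvStepB, hrawB, if_pos]
      rw [← hx0def, hw1, if_pos hcrange]
    · simp only [pvStepB, hrawB, if_pos]
      rw [← hx0def, hw1, if_pos hcrange]
      exact pvInv_occupy_in min_num max_num span _ tout u
        (pvInv_compress min_num max_num span parent tout u hInv c _ hpath) c hcrange
  · -- fresh value: both take it unchanged
    have hcontF : parent.contains raw = false := by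
      by_contra hc
      exact hraw ((hInv.1 raw).mpr (Or.inl (by simpa using hc)))
    have htoutF : PySem.Set.contains tout raw = false := by
      by_contra hc
      exact hraw ((hInv.1 raw).mpr (Or.inr (by
        rw [← PySem.Set.contains_iff]
        simpa using hc)))
    have hA : pvProbe min_num span (span.toNat + 1) u raw = raw := by
      simp only [pvProbe]
      rw [if_neg (by simpa [PySem.Set.contains_iff] using hraw)]
    have hcond : (parent.contains raw || PySem.Set.contains tout raw) = false := by
      rw [hcontF, htoutF]
      rfl
    refine ⟨raw, hraw, fun _ => rfl, fun h' => absurd h' hraw, ?_, ?_, ?_⟩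
    · unfold pvStepA
      rw [hA]
    · simp only [pvStepB, hcond, Bool.false_eq_true, if_false]
      split
      · rfl
      · rfl
    · simp only [pvStepB, hcond, Bool.false_eq_true, if_false]
      by_cases hr : min_num ≤ raw ∧ raw ≤ max_num
      · rw [if_pos hr]
        exact pvInv_occupy_in min_num max_num span parent tout u hInv raw hr
      · rw [if_neg hr]
        exact pvInv_occupy_out min_num max_num span parent tout u hInv raw hr

theorem pvNeedy_cons (min_num max_num : Int) (seen : List Int) (x : Int) (rest : List Int) :
    pvNeedy min_num max_num seen (x :: rest) =
      (if (min_num ≤ x ∧ x ≤ max_num) ∨ x ∈ seen then 1 else 0) +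
        pvNeedy min_num max_num (x :: seen) rest := rfl

-- the two folds stay in lock-step
theorem pvLoop_eq (min_num max_num span : Int) (hspan : span = max_num - min_num + 1) :
    ∀ (rest : List Int) (u : PySem.Set Int) (outA outB : List Int)
      (parent : PySem.Dict Int (Option Int)) (tout : PySem.Set Int),
      u.Nodup → pvInv min_num max_num span parent tout u → outA = outB →
      ((0 < span ∧ ∃ S : List Int,
          (∀ x ∈ u, ¬(min_num ≤ x ∧ x ≤ max_num) → x ∈ S) ∧
          (u.filter (fun x => decide (min_num ≤ x ∧ x ≤ max_num))).length +
            pvNeedy min_num max_num S rest ≤ span.toNat) ∨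
        (rest.Nodup ∧ ∀ x ∈ rest, x ∉ u)) →
      (rest.foldl (pvStepA min_num span) (u, outA)).2 =
        (rest.foldl (pvStepB min_num max_num span) (parent, tout, outB)).2.2 := by
  intro rest
  induction rest with
  | nil => intro u outA outB parent tout _ _ hout _; simpa using hout
  | cons raw rest ih =>
      intro u outA outB parent tout hu hInv hout hpre
      have hok : raw ∉ u ∨ (0 < span ∧ ∃ x : Int, min_num ≤ x ∧ x ≤ max_num ∧ x ∉ u) := by
        by_cases hraw : raw ∈ u
        · right
          rcases hpre with ⟨hpos, S, hP1, hbound⟩ | ⟨hnd, hfresh⟩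
          · refine ⟨hpos, pv_exists_free min_num max_num span hspan hpos u hu ?_⟩
            have hcontrib : ((if (min_num ≤ raw ∧ raw ≤ max_num) ∨ raw ∈ S then 1 else 0) : Nat)
                = 1 := by
              by_cases hr : min_num ≤ raw ∧ raw ≤ max_num
              · simp [hr]
              · simp [hP1 raw hraw hr]
            rw [pvNeedy_cons, hcontrib] at hbound
            omega
          · exact absurd hraw (hfresh raw (by simp))
        · left; exact hraw
      obtain ⟨c, hcfree, hcraw, hcoll, hA, hB, hInv'⟩ :=
        pvStep_eq min_num max_num span hspan u hu parent tout hInv raw outA outB hok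
      simp only [List.foldl_cons]
      rw [hA]
      have hflen : ((PySem.Set.add u c).filter
            (fun x => decide (min_num ≤ x ∧ x ≤ max_num))).length
          = (u.filter (fun x => decide (min_num ≤ x ∧ x ≤ max_num))).length
            + (if min_num ≤ c ∧ c ≤ max_num then 1 else 0) := by
        rw [PySem.Set.add_of_not_mem hcfree, List.filter_append]
        by_cases hcr : min_num ≤ c ∧ c ≤ max_num
        · simp [hcr]
        · simp [hcr]
      have := ih (PySem.Set.add u c) (outA ++ [c])
        ((pvStepB min_num max_num span (parent, tout, outB) raw).2.2)
        ((pvStepB min_num max_num span (parent, tout, outB) raw).1)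
        ((pvStepB min_num max_num span (parent, tout, outB) raw).2.1)
        (PySem.Set.nodup_add u c hu) hInv' (by rw [hB, hout]) ?_
      · rw [this]
      · rcases hpre with ⟨hpos, S, hP1, hbound⟩ | ⟨hnd, hfresh⟩
        · left
          refine ⟨hpos, raw :: S, ?_, ?_⟩
          · intro x hx hxr
            rw [PySem.Set.mem_add] at hx
            rcases hx with hx' | hx'
            · exact List.mem_cons_of_mem _ (hP1 x hx' hxr)
            · subst hx'
              by_cases hraw : raw ∈ u
              · exact absurd (hcoll hraw) hxr
              · rw [hcraw hraw]; exact List.mem_cons_self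
          · rw [pvNeedy_cons] at hbound
            rw [hflen]
            by_cases hcr : min_num ≤ c ∧ c ≤ max_num
            · -- c takes a range slot: then this element was counted by pvNeedy
              have hcount : ((if (min_num ≤ raw ∧ raw ≤ max_num) ∨ raw ∈ S then 1 else 0) : Nat)
                  = 1 := by
                by_cases hraw : raw ∈ u
                · by_cases hr : min_num ≤ raw ∧ raw ≤ max_num
                  · simp [hr]
                  · simp [hP1 raw hraw hr]
                · rw [hcraw hraw] at hcr
                  simp [hcr]
              rw [hcount] at hbound
              rw [if_pos hcr]
              omega
            · rw [if_neg hcr]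
              omega
        · right
          refine ⟨(List.nodup_cons.mp hnd).2, ?_⟩
          intro x hx
          rw [PySem.Set.mem_add]
          push_neg
          refine ⟨hfresh x (by simp [hx]), ?_⟩
          have : c = raw := hcraw (hfresh raw (by simp))
          subst this
          intro hxc
          subst hxc
          exact (List.nodup_cons.mp hnd).1 hx

-- ===== VERDICT (by name: the statement is the Claim_ definition above) =====
theorem ensure_unique_numbers_spec : Claim_equal_ensure_unique_numbers := by
  intro bs minn maxn _ hpre
  unfold Spec_ensure_unique_numbers ensure_unique_numbers ensure_unique_numbers_alt
  apply pvLoop_eq minn maxn _ rfl bs PySem.Set.empty [] [] PySem.Dict.empty PySem.Set.empty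
    (by simp [PySem.Set.empty]) (pvInv_empty _ _ _) rfl
  rcases hpre with hnd | ⟨hle, hlen⟩
  · right
    exact ⟨hnd, fun x _ => by simp [PySem.Set.empty]⟩
  · left
    refine ⟨by omega, [], ?_, ?_⟩
    · intro x hx
      simp [PySem.Set.empty] at hx
    · simp only [PySem.Set.empty, List.filter_nil, List.length_nil]
      omega
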